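-- pv_equiv track=rewrite | github.com/crisdux/ejercicios-python | 21-ejercicio.py | calculo_anios_perro
-- ===== SOURCE A (Python) =====
-- def calculo_anios_perro(human_years):
--     anios_perro = 0
--     for edad in range(1, human_years+1):
--         if edad == 1:
--             anios_perro += 15
--         if edad == 2:
--             anios_perro += 9
--         if edad >=3:
--             anios_perro +=5
--     return anios_perro
-- ===== SOURCE B (Python) =====
-- def calculo_anios_perro(human_years):
--     if human_years <= 0:
--         return 0
--     if human_years == 1:
--         return 15
--     if human_years == 2:
--         return 24
--     return 24 + 5 * (human_years - 2)
-- ===== Notes on version B (the rewrite author's own statement) =====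
-- stated objective: faster
-- what changed: Replaces the year-by-year accumulation loop with a closed-form piecewise formula evaluated directly from human_years.
import Mathlib
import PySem

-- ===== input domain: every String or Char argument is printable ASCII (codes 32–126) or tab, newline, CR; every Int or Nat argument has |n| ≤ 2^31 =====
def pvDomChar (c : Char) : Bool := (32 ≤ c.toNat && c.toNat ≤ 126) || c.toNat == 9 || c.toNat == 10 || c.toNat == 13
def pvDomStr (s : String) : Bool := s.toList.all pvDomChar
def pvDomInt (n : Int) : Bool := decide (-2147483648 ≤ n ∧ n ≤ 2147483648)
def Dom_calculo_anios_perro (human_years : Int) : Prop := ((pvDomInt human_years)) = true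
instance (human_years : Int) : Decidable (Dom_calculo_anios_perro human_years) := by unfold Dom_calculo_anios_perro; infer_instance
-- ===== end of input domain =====

-- B replaces A's year-by-year accumulation loop with a closed-form piecewise formula (faster, O(1) vs O(n)).


-- ===== PORT A =====
-- the loop body: three independent ifs, exactly as in the Python source
def pvStepA (acc : Int) (edad : Int) : Int :=
  let acc := if edad = 1 then acc + 15 else acc
  let acc := if edad = 2 then acc + 9 else acc
  if edad ≥ 3 then acc + 5 else acc

def calculo_anios_perro (human_years : Int) : Int :=
  (PySem.List.pyRange 1 (human_years + 1) 1).foldl pvStepA 0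

-- ===== PORT B =====
def calculo_anios_perro_alt (human_years : Int) : Int :=
  if human_years ≤ 0 then 0
  else if human_years = 1 then 15
  else if human_years = 2 then 24
  else 24 + 5 * (human_years - 2)

-- ===== PRECONDITION & SPEC =====
def Spec_calculo_anios_perro (human_years : Int) (out : Int) : Prop := out = calculo_anios_perro_alt human_years
instance (human_years : Int) (out : Int) : Decidable (Spec_calculo_anios_perro human_years out) := by unfold Spec_calculo_anios_perro; infer_instance

-- ===== CLAIM (what is proved, stated in full; the proofs are below) =====
def Claim_equal_calculo_anios_perro : Prop := ∀ (human_years : Int), Dom_calculo_anios_perro human_years → Spec_calculo_anios_perro human_years (calculo_anios_perro human_years)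

-- ===== LEMMAS AND PROOFS =====

-- tail of the loop: from age 3 on, every iteration adds exactly 5
lemma pvTail (k : Nat) (acc : Int) :
    (PySem.List.pyRange 3 (3 + k) 1).foldl pvStepA acc = acc + 5 * k := by
  induction k generalizing acc with
  | zero => simp [PySem.List.pyRange_one_eq_nil]
  | succ k ih =>
      have h : (3 : Int) ≤ 3 + (k : Int) := by omega
      have hc : (3 : Int) + (↑(k + 1) : Int) = (3 + (k : Int)) + 1 := by push_cast; ring
      rw [hc, PySem.List.pyRange_one_succ_right h, List.foldl_append, ih]
      simp only [List.foldl]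
      have h1 : (3 + (k : Int)) ≠ 1 := by omega
      have h2 : (3 + (k : Int)) ≠ 2 := by omega
      have h3 : (3 + (k : Int)) ≥ 3 := by omega
      simp [pvStepA, h1, h2, h3]
      ring

-- ===== VERDICT (by name: the statement is the Claim_ definition above) =====
theorem calculo_anios_perro_spec : Claim_equal_calculo_anios_perro := by
  intro n _
  unfold Spec_calculo_anios_perro calculo_anios_perro calculo_anios_perro_alt
  rcases le_or_gt n 0 with h0 | h0
  · rw [PySem.List.pyRange_one_eq_nil (by omega)]
    simp [h0]
  · rcases eq_or_ne n 1 with h1 | h1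
    · subst h1; decide
    · rcases eq_or_ne n 2 with h2 | h2
      · subst h2; decide
      · have h3 : 3 ≤ n := by omega
        rw [PySem.List.pyRange_one_append 1 3 (n+1) (by omega) (by omega),
            List.foldl_append]
        have hsplit : n + 1 = 3 + ((n - 2).toNat : Int) := by omega
        rw [hsplit, pvTail]
        have : (PySem.List.pyRange 1 3 1).foldl pvStepA 0 = 24 := by decide
        rw [this]
        simp only [if_neg (by omega : ¬ n ≤ 0), if_neg h1, if_neg h2]
        omega
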